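-- pv_equiv track=rewrite | github.com/nachmay/riscv-grid | regression_tests/ipr_tests/test4/count_latency_rv_link.py | compute_latencies
-- ===== SOURCE A (Python) =====
-- def compute_latencies(sw_ops, lw_ops, pa_sw_expected, pa_lw_expected):
--     latencies = []
--     used_lw = set()
--     max_info = {"latency": -1}
--
--     for instr_sw, time_sw, cc_sw, pa_sw, val_sw in sw_ops:
--         if pa_sw != pa_sw_expected:
--             continue
--
--         for i, (instr_lw, time_lw, cc_lw, pa_lw, val_lw) in enumerate(lw_ops):
--             if i in used_lw:
--                 continue
--             if pa_lw == pa_lw_expected and val_sw == val_lw and time_lw >= time_sw: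
--                 latency = cc_lw - cc_sw
--                 latencies.append(latency)
--                 used_lw.add(i)
--
--                 if latency > max_info["latency"]:
--                     max_info = {
--                         "latency": latency,
--                         "value": val_sw,
--                         "PA": pa_sw,
--                         "sw_cc": cc_sw,
--                         "lw_cc": cc_lw
--                     }
--                 break
--     return latencies, max_info
-- ===== SOURCE B (Python) =====
-- def compute_latencies(sw_ops, lw_ops, pa_sw_expected, pa_lw_expected):
--     # Group the relevant load ops by value once, so each store only scans
--     # its own value-group instead of the whole load list.
--     groups = {}
--     for _instr, time_lw, cc_lw, pa_lw, val_lw in lw_ops: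
--         if pa_lw == pa_lw_expected:
--             groups.setdefault(val_lw, []).append((time_lw, cc_lw))
--     latencies = []
--     best = None  # (latency, value, PA, sw_cc, lw_cc)
--     for _instr, time_sw, cc_sw, pa_sw, val_sw in sw_ops:
--         if pa_sw != pa_sw_expected:
--             continue
--         g = groups.get(val_sw)
--         if not g:
--             continue
--         for k, (time_lw, cc_lw) in enumerate(g):
--             if time_lw >= time_sw:
--                 del g[k]
--                 latency = cc_lw - cc_sw
--                 latencies.append(latency)
--                 if latency > (best[0] if best is not None else -1):
--                     best = (latency, val_sw, pa_sw, cc_sw, cc_lw)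
--                 break
--     if best is None:
--         return latencies, {"latency": -1}
--     return latencies, {"latency": best[0], "value": best[1],
--                        "PA": best[2], "sw_cc": best[3], "lw_cc": best[4]}
-- ===== Notes on version B (the rewrite author's own statement) =====
-- stated objective: alternative
-- what changed: B pre-groups the pa-matching load ops by value into a dict of per-value queues built in one pass, so each store scans only its own value-group (deleting the matched entry) instead of rescanning the whole load list with a used-index set; the running max is a tuple and the max_info dict is built once at the end.
import Mathlib
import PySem

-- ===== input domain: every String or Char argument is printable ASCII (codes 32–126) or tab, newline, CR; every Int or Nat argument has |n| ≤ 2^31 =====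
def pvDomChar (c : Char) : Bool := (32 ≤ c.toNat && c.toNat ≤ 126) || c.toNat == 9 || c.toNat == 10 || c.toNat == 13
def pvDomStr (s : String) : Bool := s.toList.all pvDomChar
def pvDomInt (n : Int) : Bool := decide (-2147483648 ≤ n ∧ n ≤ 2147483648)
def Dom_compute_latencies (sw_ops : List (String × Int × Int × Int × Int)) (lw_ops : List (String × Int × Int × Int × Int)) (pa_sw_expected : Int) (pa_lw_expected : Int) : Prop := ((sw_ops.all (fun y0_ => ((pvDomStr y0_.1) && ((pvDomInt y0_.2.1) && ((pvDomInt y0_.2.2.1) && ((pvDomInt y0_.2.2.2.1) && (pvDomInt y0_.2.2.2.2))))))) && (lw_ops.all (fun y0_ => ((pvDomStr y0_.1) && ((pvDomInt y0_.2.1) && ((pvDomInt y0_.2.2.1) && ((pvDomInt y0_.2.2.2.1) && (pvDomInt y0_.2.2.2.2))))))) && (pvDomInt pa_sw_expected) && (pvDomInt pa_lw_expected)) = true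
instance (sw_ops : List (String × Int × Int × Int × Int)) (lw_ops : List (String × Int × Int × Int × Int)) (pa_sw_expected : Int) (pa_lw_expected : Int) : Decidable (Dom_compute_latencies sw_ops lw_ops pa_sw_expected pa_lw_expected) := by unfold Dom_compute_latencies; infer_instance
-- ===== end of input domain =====

-- B groups the pa-matching load ops by value once, so each store scans only its own
-- value-group (deleting the matched entry) instead of rescanning all loads with a used set
-- (objective: alternative algorithm). Return values proved identical on every input.

-- an op is (instr, time, cc, pa, val)
abbrev pvOp : Type := String × Int × Int × Int × Int

-- ===== PORT A =====
-- enumerate(lw_ops)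
def pvEnumFrom (n : Int) : List pvOp → List (Int × pvOp)
  | [] => []
  | x :: rest => (n, x) :: pvEnumFrom (n + 1) rest

-- the inner for-loop with break: first index i ∉ used with pa_lw == E, val_sw == val_lw, time_lw >= time_sw
def pvFindA (used : PySem.Set Int) (valSw timeSw Elw : Int) : List (Int × pvOp) → Option (Int × Int)
  | [] => none
  | (i, (_, time_lw, cc_lw, pa_lw, val_lw)) :: rest =>
    if i ∈ used then pvFindA used valSw timeSw Elw rest
    else if pa_lw = Elw ∧ valSw = val_lw ∧ time_lw ≥ timeSw then some (i, cc_lw)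
    else pvFindA used valSw timeSw Elw rest

-- max_info["latency"] (the key is always present; first-match lookup)
def pvGetLat (mi : List (String × Int)) : Int := (mi.lookup "latency").getD (-1)

-- one iteration of the outer for-loop; state = (latencies, used_lw, max_info)
def pvStepA (Esw Elw : Int) (enumLw : List (Int × pvOp))
    (st : List Int × PySem.Set Int × List (String × Int)) (op : pvOp) :
    List Int × PySem.Set Int × List (String × Int) :=
  if op.2.2.2.1 = Esw then
    match pvFindA st.2.1 op.2.2.2.2 op.2.1 Elw enumLw with
    | none => st
    | some (i, cc_lw) =>
      let latency := cc_lw - op.2.2.1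
      (st.1 ++ [latency], PySem.Set.add st.2.1 i,
       if latency > pvGetLat st.2.2 then
         [("latency", latency), ("value", op.2.2.2.2), ("PA", op.2.2.2.1),
          ("sw_cc", op.2.2.1), ("lw_cc", cc_lw)]
       else st.2.2)
  else st

def compute_latencies (sw_ops : List (String × Int × Int × Int × Int)) (lw_ops : List (String × Int × Int × Int × Int)) (pa_sw_expected : Int) (pa_lw_expected : Int) : List Int × (List (String × Int)) :=
  let st := sw_ops.foldl (pvStepA pa_sw_expected pa_lw_expected (pvEnumFrom 0 lw_ops))
    ([], PySem.Set.empty, [("latency", -1)])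
  (st.1, st.2.2)

-- ===== PORT B =====
-- groups.setdefault(val_lw, []).append((time_lw, cc_lw)) for pa-matching loads
def pvBuildStep (Elw : Int) (d : PySem.Dict Int (List (Int × Int))) (op : pvOp) :
    PySem.Dict Int (List (Int × Int)) :=
  if op.2.2.2.1 = Elw then d.modify op.2.2.2.2 [] (· ++ [(op.2.1, op.2.2.1)]) else d

def pvBuildGroups (Elw : Int) (lw : List pvOp) : PySem.Dict Int (List (Int × Int)) :=
  lw.foldl (pvBuildStep Elw) PySem.Dict.empty

-- scan the value-group for the first (time, cc) with time >= timeSw; return cc and the group with it deleted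
def pvTakeFirst (timeSw : Int) : List (Int × Int) → Option (Int × List (Int × Int))
  | [] => none
  | (t, cc) :: rest =>
    if t ≥ timeSw then some (cc, rest)
    else match pvTakeFirst timeSw rest with
      | none => none
      | some (cc', rest') => some (cc', (t, cc) :: rest')

-- best = None | (latency, value, PA, sw_cc, lw_cc)
def pvBestLat (b : Option (Int × Int × Int × Int × Int)) : Int :=
  match b with | none => -1 | some x => x.1

def pvMiOf (b : Option (Int × Int × Int × Int × Int)) : List (String × Int) :=
  match b with
  | none => [("latency", -1)]
  | some (l, v, p, s, w) =>
      [("latency", l), ("value", v), ("PA", p), ("sw_cc", s), ("lw_cc", w)]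

-- one iteration of B's store loop; state = (groups, latencies, best)
def pvStepB (Esw : Int)
    (st : PySem.Dict Int (List (Int × Int)) × List Int × Option (Int × Int × Int × Int × Int))
    (op : pvOp) :
    PySem.Dict Int (List (Int × Int)) × List Int × Option (Int × Int × Int × Int × Int) :=
  if op.2.2.2.1 = Esw then
    match PySem.Dict.get? st.1 op.2.2.2.2 with
    | none => st
    | some g =>
      match pvTakeFirst op.2.1 g with
      | none => st
      | some (cc_lw, rest) =>
        let latency := cc_lw - op.2.2.1
        (st.1.insert op.2.2.2.2 rest, st.2.1 ++ [latency],
         if latency > pvBestLat st.2.2 then some (latency, op.2.2.2.2, op.2.2.2.1, op.2.2.1, cc_lw)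
         else st.2.2)
  else st

def compute_latencies_alt (sw_ops : List (String × Int × Int × Int × Int)) (lw_ops : List (String × Int × Int × Int × Int)) (pa_sw_expected : Int) (pa_lw_expected : Int) : List Int × (List (String × Int)) :=
  let st := sw_ops.foldl (pvStepB pa_sw_expected) (pvBuildGroups pa_lw_expected lw_ops, [], none)
  (st.2.1, pvMiOf st.2.2)

-- ===== PRECONDITION & SPEC =====
def Spec_compute_latencies (sw_ops : List (String × Int × Int × Int × Int)) (lw_ops : List (String × Int × Int × Int × Int)) (pa_sw_expected : Int) (pa_lw_expected : Int) (out : List Int × (List (String × Int))) : Prop := out = compute_latencies_alt sw_ops lw_ops pa_sw_expected pa_lw_expected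
instance (sw_ops : List (String × Int × Int × Int × Int)) (lw_ops : List (String × Int × Int × Int × Int)) (pa_sw_expected : Int) (pa_lw_expected : Int) (out : List Int × (List (String × Int))) : Decidable (Spec_compute_latencies sw_ops lw_ops pa_sw_expected pa_lw_expected out) := by unfold Spec_compute_latencies; infer_instance

-- ===== CLAIM (what is proved, stated in full; the proofs are below) =====
def Claim_equal_compute_latencies : Prop := ∀ (sw_ops : List (String × Int × Int × Int × Int)) (lw_ops : List (String × Int × Int × Int × Int)) (pa_sw_expected : Int) (pa_lw_expected : Int), Dom_compute_latencies sw_ops lw_ops pa_sw_expected pa_lw_expected → Spec_compute_latencies sw_ops lw_ops pa_sw_expected pa_lw_expected (compute_latencies sw_ops lw_ops pa_sw_expected pa_lw_expected)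

-- ===== LEMMAS AND PROOFS =====

-- what remains of the value-v group after deleting the used indices
def pvGrem (Elw v : Int) (used : PySem.Set Int) : List (Int × pvOp) → List (Int × Int)
  | [] => []
  | (i, (_, t, cc, pa, vl)) :: rest =>
    if pa = Elw ∧ v = vl ∧ i ∉ used then (t, cc) :: pvGrem Elw v used rest
    else pvGrem Elw v used rest

lemma pvEnumFrom_ge (l : List pvOp) : ∀ n i, i ∈ (pvEnumFrom n l).map Prod.fst → n ≤ i := by
  induction l with
  | nil => intro n i h; simp [pvEnumFrom] at h
  | cons x rest ih =>
    intro n i h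
    simp only [pvEnumFrom, List.map_cons, List.mem_cons] at h
    rcases h with h | h
    · omega
    · have := ih (n + 1) i h; omega

lemma pvEnumFrom_nodup (l : List pvOp) : ∀ n, ((pvEnumFrom n l).map Prod.fst).Nodup := by
  induction l with
  | nil => intro n; simp [pvEnumFrom]
  | cons x rest ih =>
    intro n
    simp only [pvEnumFrom, List.map_cons, List.nodup_cons]
    exact ⟨fun h => by have := pvEnumFrom_ge rest (n + 1) n h; omega, ih (n + 1)⟩

lemma pvFindA_mem (used : PySem.Set Int) (v t E : Int) :
    ∀ (l : List (Int × pvOp)) (i cc : Int),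
      pvFindA used v t E l = some (i, cc) → i ∈ l.map Prod.fst := by
  intro l
  induction l with
  | nil => intro i cc h; simp [pvFindA] at h
  | cons x rest ih =>
    obtain ⟨j, s, tl, ccl, pal, vll⟩ := x
    intro i cc h
    simp only [pvFindA] at h
    split_ifs at h with h1 h2
    · exact List.mem_cons_of_mem _ (ih i cc h)
    · simp only [Option.some.injEq, Prod.mk.injEq] at h
      simp [h.1]
    · exact List.mem_cons_of_mem _ (ih i cc h)

lemma pvGrem_add_not_mem (E v : Int) (used : PySem.Set Int) (i : Int) :
    ∀ (l : List (Int × pvOp)), i ∉ l.map Prod.fst →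
      pvGrem E v (PySem.Set.add used i) l = pvGrem E v used l := by
  intro l
  induction l with
  | nil => intro _; rfl
  | cons x rest ih =>
    obtain ⟨j, s, tl, ccl, pal, vll⟩ := x
    intro h
    simp only [List.map_cons, List.mem_cons, not_or] at h
    have hj : (j ∈ PySem.Set.add used i) ↔ j ∈ used := by
      rw [PySem.Set.mem_add used i j]
      constructor
      · rintro (h' | h')
        · exact h'
        · exact absurd h'.symm h.1
      · exact Or.inl
    simp only [pvGrem, hj, ih h.2]

-- the heart: A's inner scan over all loads agrees with B's scan of the value-v group,
-- and marking the found index used is exactly deleting the found group entry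
lemma pvFind_take (E v t : Int) (used : PySem.Set Int) :
    ∀ (l : List (Int × pvOp)), (l.map Prod.fst).Nodup →
      (pvFindA used v t E l = none ∧ pvTakeFirst t (pvGrem E v used l) = none)
      ∨ ∃ i cc, pvFindA used v t E l = some (i, cc) ∧
          pvTakeFirst t (pvGrem E v used l) = some (cc, pvGrem E v (PySem.Set.add used i) l) ∧
          ∀ v', v' ≠ v → pvGrem E v' (PySem.Set.add used i) l = pvGrem E v' used l := by
  intro l
  induction l with
  | nil => intro _; left; exact ⟨rfl, rfl⟩
  | cons x rest ih =>
    obtain ⟨j, s, tl, ccl, pal, vll⟩ := x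
    intro hnd
    simp only [List.map_cons, List.nodup_cons] at hnd
    obtain ⟨hjr, hndr⟩ := hnd
    by_cases hj : j ∈ used
    · -- j already used: head skipped everywhere
      have hstep : pvFindA used v t E ((j, (s, tl, ccl, pal, vll)) :: rest)
          = pvFindA used v t E rest := by simp [pvFindA, hj]
      have hg : ∀ v'' u, j ∈ u →
          pvGrem E v'' u ((j, (s, tl, ccl, pal, vll)) :: rest) = pvGrem E v'' u rest := by
        intro v'' u hu; simp [pvGrem, hu]
      rcases ih hndr with ⟨h1, h2⟩ | ⟨i, cc, h1, h2, h3⟩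
      · left
        rw [hstep, hg v used hj]
        exact ⟨h1, h2⟩
      · right
        refine ⟨i, cc, by rw [hstep]; exact h1, ?_, ?_⟩
        · have hji : j ∈ PySem.Set.add used i := (PySem.Set.mem_add used i j).2 (Or.inl hj)
          rw [hg v used hj, hg v (PySem.Set.add used i) hji, h2]
        · intro v' hv'
          have hji : j ∈ PySem.Set.add used i := (PySem.Set.mem_add used i j).2 (Or.inl hj)
          rw [hg v' used hj, hg v' (PySem.Set.add used i) hji, h3 v' hv']
    · by_cases hc : pal = E ∧ v = vll ∧ tl ≥ t
      · -- found at the head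
        right
        refine ⟨j, ccl, by simp [pvFindA, hj, hc], ?_, ?_⟩
        · have hhead : pvGrem E v used ((j, (s, tl, ccl, pal, vll)) :: rest)
              = (tl, ccl) :: pvGrem E v used rest := by
            simp [pvGrem, hc.1, hc.2.1, hj]
          have hjj : j ∈ PySem.Set.add used j := (PySem.Set.mem_add used j j).2 (Or.inr rfl)
          have htail : pvGrem E v (PySem.Set.add used j) ((j, (s, tl, ccl, pal, vll)) :: rest)
              = pvGrem E v used rest := by
            simp only [pvGrem, hjj, not_true_eq_false, and_false, if_false]
            exact pvGrem_add_not_mem E v used j rest hjr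
          rw [hhead, htail]
          simp [pvTakeFirst, hc.2.2]
        · intro v' hv'
          have hvl : ¬ (v' = vll) := by rw [← hc.2.1]; exact hv'
          simp only [pvGrem, hvl, false_and, and_false, if_false]
          exact pvGrem_add_not_mem E v' used j rest hjr
      · -- head not taken by findA
        have hstep : pvFindA used v t E ((j, (s, tl, ccl, pal, vll)) :: rest)
            = pvFindA used v t E rest := by
          simp only [pvFindA, hj, if_false, if_neg hc]
        rcases ih hndr with ⟨h1, h2⟩ | ⟨i, cc, h1, h2, h3⟩
        · -- nothing found in the rest either
          left
          refine ⟨by rw [hstep]; exact h1, ?_⟩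
          by_cases hh : pal = E ∧ v = vll
          · obtain ⟨hpal, hvv⟩ := hh
            subst hvv
            have htl : ¬ (tl ≥ t) := fun h => hc ⟨hpal, rfl, h⟩
            simp [pvGrem, hpal, hj, pvTakeFirst, htl, h2]
          · have : pvGrem E v used ((j, (s, tl, ccl, pal, vll)) :: rest) = pvGrem E v used rest := by
              simp only [pvGrem]
              rw [if_neg (by tauto)]
            rw [this]; exact h2
        · right
          have hij : i ≠ j := by
            intro he
            exact hjr (he ▸ pvFindA_mem used v t E rest i cc h1)
          have hjadd : (j ∈ PySem.Set.add used i) ↔ j ∈ used := by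
            rw [PySem.Set.mem_add used i j]
            constructor
            · rintro (h' | h')
              · exact h'
              · exact absurd h'.symm hij
            · exact Or.inl
          refine ⟨i, cc, by rw [hstep]; exact h1, ?_, ?_⟩
          · by_cases hh : pal = E ∧ v = vll
            · obtain ⟨hpal, hvv⟩ := hh
              subst hvv
              have htl : ¬ (tl ≥ t) := fun h => hc ⟨hpal, rfl, h⟩
              have hji : j ≠ i := Ne.symm hij
              simp [pvGrem, hpal, hj, hji, pvTakeFirst, htl, h2]
            · have h5 : ∀ u, pvGrem E v u ((j, (s, tl, ccl, pal, vll)) :: rest) = pvGrem E v u rest := by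
                intro u; simp only [pvGrem]; rw [if_neg (by tauto)]
              rw [h5, h5, h2]
          · intro v' hv'
            simp only [pvGrem, hjadd, h3 v' hv']

lemma pvDict_getD_of_get?_some (d : PySem.Dict Int (List (Int × Int))) (k : Int)
    (g : List (Int × Int)) (h : d.get? k = some g) : d.getD k [] = g := by
  simp [PySem.Dict.getD, h]

lemma pvDict_getD_of_get?_none (d : PySem.Dict Int (List (Int × Int))) (k : Int)
    (h : d.get? k = none) : d.getD k [] = [] := by
  simp [PySem.Dict.getD, h]

-- building the groups dict once = the per-value remainder lists with nothing used yet
lemma pvBuild_getD (E : Int) :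
    ∀ (lw : List pvOp) (d : PySem.Dict Int (List (Int × Int))) (n v : Int),
      (lw.foldl (pvBuildStep E) d).getD v [] = d.getD v [] ++ pvGrem E v PySem.Set.empty (pvEnumFrom n lw) := by
  intro lw
  induction lw with
  | nil => intro d n v; simp [pvEnumFrom, pvGrem]
  | cons x rest ih =>
    obtain ⟨s, t, cc, pa, vl⟩ := x
    intro d n v
    simp only [List.foldl_cons, pvEnumFrom, pvGrem]
    have hne : (n ∉ (PySem.Set.empty : PySem.Set Int)) := by simp [PySem.Set.empty]
    by_cases hpa : pa = E
    · by_cases hv : v = vl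
      · have hd : (pvBuildStep E d (s, t, cc, pa, vl)).getD v [] = d.getD v [] ++ [(t, cc)] := by
          simp only [pvBuildStep]
          rw [if_pos hpa, ← hv]
          exact PySem.Dict.getD_modify_self d v [] _
        rw [ih _ (n + 1) v, hd, if_pos ⟨hpa, hv, hne⟩]
        simp
      · have hd : (pvBuildStep E d (s, t, cc, pa, vl)).getD v [] = d.getD v [] := by
          simp only [pvBuildStep]
          rw [if_pos hpa]
          exact PySem.Dict.getD_modify_of_ne d [] _ hv
        rw [ih _ (n + 1) v, hd, if_neg (by tauto)]
    · simp only [pvBuildStep, if_neg hpa]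
      rw [ih d (n + 1) v, if_neg (by tauto)]

lemma pvGetLat_miOf (b : Option (Int × Int × Int × Int × Int)) :
    pvGetLat (pvMiOf b) = pvBestLat b := by
  match b with
  | none => rfl
  | some (l, v, p, s, w) => rfl

-- one store step preserves the relation between A's and B's states
lemma pvStep_rel (Esw Elw : Int) (lw : List pvOp) (op : pvOp)
    (lats : List Int) (used : PySem.Set Int) (best : Option (Int × Int × Int × Int × Int))
    (groups : PySem.Dict Int (List (Int × Int)))
    (hInv : ∀ v, groups.getD v [] = pvGrem Elw v used (pvEnumFrom 0 lw)) :
    (pvStepA Esw Elw (pvEnumFrom 0 lw) (lats, used, pvMiOf best) op).1 = (pvStepB Esw (groups, lats, best) op).2.1 ∧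
    (pvStepA Esw Elw (pvEnumFrom 0 lw) (lats, used, pvMiOf best) op).2.2 = pvMiOf (pvStepB Esw (groups, lats, best) op).2.2 ∧
    ∀ v, (pvStepB Esw (groups, lats, best) op).1.getD v []
        = pvGrem Elw v (pvStepA Esw Elw (pvEnumFrom 0 lw) (lats, used, pvMiOf best) op).2.1 (pvEnumFrom 0 lw) := by
  obtain ⟨s, tsw, ccsw, pasw, vsw⟩ := op
  by_cases hpa : pasw = Esw
  · simp only [pvStepA, pvStepB, if_pos hpa]
    rcases pvFind_take Elw vsw tsw used (pvEnumFrom 0 lw) (pvEnumFrom_nodup lw 0) with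
      ⟨h1, h2⟩ | ⟨i, cc, h1, h2, h3⟩
    · rw [h1]
      cases hg : groups.get? vsw with
      | none => exact ⟨rfl, rfl, hInv⟩
      | some g =>
        have hgeq : g = pvGrem Elw vsw used (pvEnumFrom 0 lw) := by
          rw [← hInv vsw]; exact (pvDict_getD_of_get?_some groups vsw g hg).symm
        rw [hgeq]
        dsimp only
        rw [h2]
        exact ⟨rfl, rfl, hInv⟩
    · rw [h1]
      cases hg : groups.get? vsw with
      | none =>
        exfalso
        have : pvGrem Elw vsw used (pvEnumFrom 0 lw) = [] := by
          rw [← hInv vsw]; exact pvDict_getD_of_get?_none groups vsw hg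
        rw [this] at h2
        simp [pvTakeFirst] at h2
      | some g =>
        have hgeq : g = pvGrem Elw vsw used (pvEnumFrom 0 lw) := by
          rw [← hInv vsw]; exact (pvDict_getD_of_get?_some groups vsw g hg).symm
        rw [hgeq]
        dsimp only
        rw [h2]
        dsimp only
        refine ⟨rfl, ?_, ?_⟩
        · simp only [pvGetLat_miOf]
          by_cases hlt : cc - ccsw > pvBestLat best
          · simp [hlt, pvMiOf]
          · simp [hlt]
        · intro v
          by_cases hv : v = vsw
          · subst hv
            rw [PySem.Dict.getD_insert_self]
          · rw [PySem.Dict.getD_insert_of_ne groups _ _ hv, hInv v, h3 v hv]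
  · simp only [pvStepA, pvStepB, if_neg hpa]
    exact ⟨trivial, trivial, hInv⟩

lemma pvFold_rel (Esw Elw : Int) (lw : List pvOp) :
    ∀ (sw : List pvOp) (lats : List Int) (used : PySem.Set Int)
      (best : Option (Int × Int × Int × Int × Int)) (groups : PySem.Dict Int (List (Int × Int))),
      (∀ v, groups.getD v [] = pvGrem Elw v used (pvEnumFrom 0 lw)) →
      (sw.foldl (pvStepA Esw Elw (pvEnumFrom 0 lw)) (lats, used, pvMiOf best)).1
        = (sw.foldl (pvStepB Esw) (groups, lats, best)).2.1 ∧
      (sw.foldl (pvStepA Esw Elw (pvEnumFrom 0 lw)) (lats, used, pvMiOf best)).2.2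
        = pvMiOf (sw.foldl (pvStepB Esw) (groups, lats, best)).2.2 := by
  intro sw
  induction sw with
  | nil => intro lats used best groups _; exact ⟨rfl, rfl⟩
  | cons op rest ih =>
    intro lats used best groups hInv
    obtain ⟨e1, e2, e3⟩ := pvStep_rel Esw Elw lw op lats used best groups hInv
    simp only [List.foldl_cons]
    set a1 := pvStepA Esw Elw (pvEnumFrom 0 lw) (lats, used, pvMiOf best) op with ha1
    set b1 := pvStepB Esw (groups, lats, best) op with hb1
    have haeq : a1 = (b1.2.1, a1.2.1, pvMiOf b1.2.2) := by
      rw [← e1, ← e2]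
    have hbeq : b1 = (b1.1, b1.2.1, b1.2.2) := rfl
    rw [haeq, hbeq]
    exact ih b1.2.1 a1.2.1 b1.2.2 b1.1 e3

-- ===== VERDICT (by name: the statement is the Claim_ definition above) =====
theorem compute_latencies_spec : Claim_equal_compute_latencies := by
  intro sw lw Esw Elw _
  unfold Spec_compute_latencies compute_latencies compute_latencies_alt
  have hInv : ∀ v, (pvBuildGroups Elw lw).getD v [] = pvGrem Elw v PySem.Set.empty (pvEnumFrom 0 lw) := by
    intro v
    rw [pvBuildGroups, pvBuild_getD Elw lw PySem.Dict.empty 0 v]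
    simp [pysem]
  have h := pvFold_rel Esw Elw lw sw [] PySem.Set.empty none (pvBuildGroups Elw lw) hInv
  simp only [pvMiOf] at h
  exact Prod.ext h.1 h.2
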